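-- pv_equiv track=rewrite | github.com/tientran0826/Combine-Large-Language-Model-with-Logical-Symbolic-Solver-for-multi-hop-problems-in-RAG | models/logic_program.py | extract_logic_statements
-- ===== SOURCE A (Python) =====
-- def extract_logic_statements(text):
--     lines = text.split('\n')
--     premises = []
--     conclusion = ""
--     in_premises = False
--     in_conclusion = False
--
--     for line in lines:
--         line = line.strip()
--         if line.startswith("Premises:"):
--             in_premises = True
--             continue
--         elif line.startswith("Conclusion:"):
--             in_premises = False
--             in_conclusion = True
--             continue
--
--         if in_premises:
--             if line:
--                 premises.append(line)
--         elif in_conclusion: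
--             if line:
--                 conclusion = line
--
--     return premises, conclusion
-- ===== SOURCE B (Python) =====
-- def extract_logic_statements(text):
--     # Two-pass decomposition: first tag each body line with its section,
--     # then extract premises and conclusion separately.
--     tagged = []
--     current = None
--     for raw in text.split('\n'):
--         line = raw.strip()
--         if line.startswith("Premises:"):
--             current = "Premises"
--         elif line.startswith("Conclusion:"):
--             current = "Conclusion"
--         elif current is not None:
--             tagged.append((current, line))
--     premises = [l for s, l in tagged if s == "Premises" and l]
--     conclusion = next((l for s, l in reversed(tagged) if s == "Conclusion" and l), "")
--     return premises, conclusion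
-- ===== Notes on version B (the rewrite author's own statement) =====
-- stated objective: alternative
-- what changed: Replaced the single interleaved two-boolean state machine (which appends premises and overwrites the conclusion while scanning) by a two-pass decomposition: one pass tags each body line with its current section, then premises are extracted by a filter and the conclusion by a backwards search for the last non-empty Conclusion line.
import Mathlib
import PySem

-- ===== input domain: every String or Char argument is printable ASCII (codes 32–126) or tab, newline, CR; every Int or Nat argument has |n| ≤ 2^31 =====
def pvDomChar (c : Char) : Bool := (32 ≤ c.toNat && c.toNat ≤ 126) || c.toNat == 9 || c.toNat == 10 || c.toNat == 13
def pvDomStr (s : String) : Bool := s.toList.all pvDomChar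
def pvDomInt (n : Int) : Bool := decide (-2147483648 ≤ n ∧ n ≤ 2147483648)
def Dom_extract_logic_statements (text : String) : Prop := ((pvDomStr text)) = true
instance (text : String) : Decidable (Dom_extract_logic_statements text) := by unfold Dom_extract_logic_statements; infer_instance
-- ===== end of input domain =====

-- B replaces A's interleaved two-boolean state machine by a two-pass decomposition
-- (tag lines with their section, then extract premises by a filter and the
-- conclusion by a backwards search); objective: alternative structure, same cost.

-- ===== PORT A =====
-- state: (premises, conclusion, in_premises, in_conclusion)
def pvStepA (st : List String × String × Bool × Bool) (raw : String) : List String × String × Bool × Bool :=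
  let line := PySem.Str.strip raw
  match st with
  | (premises, conclusion, inP, inC) =>
    if PySem.Str.startswith line "Premises:" then (premises, conclusion, true, inC)
    else if PySem.Str.startswith line "Conclusion:" then (premises, conclusion, false, true)
    else if inP then
      (if line ≠ "" then (premises ++ [line], conclusion, inP, inC) else (premises, conclusion, inP, inC))
    else if inC then
      (if line ≠ "" then (premises, line, inP, inC) else (premises, conclusion, inP, inC))
    else (premises, conclusion, inP, inC)

def extract_logic_statements (text : String) : List String × String :=
  let st := ((PySem.Str.split? text "\n").getD []).foldl pvStepA ([], "", false, false)
  (st.1, st.2.1)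

-- ===== PORT B =====
-- pass 1: tag each body line with its current section (none before any marker)
def pvStepB (st : List (String × String) × Option String) (raw : String) : List (String × String) × Option String :=
  let line := PySem.Str.strip raw
  match st with
  | (items, current) =>
    if PySem.Str.startswith line "Premises:" then (items, some "Premises")
    else if PySem.Str.startswith line "Conclusion:" then (items, some "Conclusion")
    else match current with
      | some s => (items ++ [(s, line)], current)
      | none => (items, current)

-- pass 2: the two extractions
def pvPrems (items : List (String × String)) : List String :=
  (items.filter (fun p => p.1 == "Premises" && p.2 != "")).map Prod.snd

def pvConcl (items : List (String × String)) : String :=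
  (((items.reverse).find? (fun p => p.1 == "Conclusion" && p.2 != "")).map Prod.snd).getD ""

def extract_logic_statements_alt (text : String) : List String × String :=
  let r := ((PySem.Str.split? text "\n").getD []).foldl pvStepB ([], none)
  (pvPrems r.1, pvConcl r.1)

-- ===== PRECONDITION & SPEC =====
def Spec_extract_logic_statements (text : String) (out : List String × String) : Prop := out = extract_logic_statements_alt text
instance (text : String) (out : List String × String) : Decidable (Spec_extract_logic_statements text out) := by unfold Spec_extract_logic_statements; infer_instance

-- ===== CLAIM (what is proved, stated in full; the proofs are below) =====
def Claim_equal_extract_logic_statements : Prop := ∀ (text : String), Dom_extract_logic_statements text → Spec_extract_logic_statements text (extract_logic_statements text)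

-- ===== LEMMAS AND PROOFS =====

-- A's two booleans encoded as B's current-section variable
def pvEnc (inP inC : Bool) : Option String :=
  if inP then some "Premises" else if inC then some "Conclusion" else none

theorem pvPrems_append (items : List (String × String)) (s l : String) :
    pvPrems (items ++ [(s, l)]) =
      pvPrems items ++ (if s == "Premises" && l != "" then [l] else []) := by
  simp only [pvPrems, List.filter_append, List.map_append]
  split <;> simp_all

theorem pvConcl_append (items : List (String × String)) (s l : String) :
    pvConcl (items ++ [(s, l)]) =
      if s == "Conclusion" && l != "" then l else pvConcl items := by
  simp only [pvConcl, List.reverse_append, List.reverse_cons, List.reverse_nil,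
    List.nil_append, List.cons_append, List.find?]
  split <;> simp_all

theorem pvFold_rel (lines : List String) :
    ∀ (items : List (String × String)) (P : List String) (c : String) (inP inC : Bool),
      P = pvPrems items → c = pvConcl items →
      (lines.foldl pvStepA (P, c, inP, inC)).1 = pvPrems (lines.foldl pvStepB (items, pvEnc inP inC)).1 ∧
      (lines.foldl pvStepA (P, c, inP, inC)).2.1 = pvConcl (lines.foldl pvStepB (items, pvEnc inP inC)).1 := by
  induction lines with
  | nil => intro items P c inP inC hP hc; simp [hP, hc]
  | cons raw rest ih =>
    intro items P c inP inC hP hc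
    simp only [List.foldl_cons]
    by_cases h1 : PySem.Str.startswith (PySem.Str.strip raw) "Premises:" = true
    · simp only [pvStepA, pvStepB, h1, if_pos]
      exact ih items P c true inC hP hc
    · by_cases h2 : PySem.Str.startswith (PySem.Str.strip raw) "Conclusion:" = true
      · simp only [pvStepA, pvStepB, h1, h2, if_neg, Bool.not_eq_true, if_pos]
        exact ih items P c false true hP hc
      · cases inP with
        | true =>
          simp only [pvStepA, pvStepB, h1, h2, pvEnc, if_pos, if_neg, Bool.not_eq_true]
          by_cases hl : PySem.Str.strip raw = ""
          · simp only [hl, ne_eq, not_true_eq_false, if_neg, not_false_eq_true]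
            have := ih (items ++ [("Premises", "")]) P c true inC
              (by rw [pvPrems_append]; simp [hP]) (by rw [pvConcl_append]; simp [hc])
            simpa [pvEnc, hl] using this
          · have := ih (items ++ [("Premises", PySem.Str.strip raw)]) (P ++ [PySem.Str.strip raw]) c true inC
              (by rw [pvPrems_append]; simp [hP, hl]) (by rw [pvConcl_append]; simp [hc])
            simpa [pvEnc, hl] using this
        | false =>
          cases inC with
          | true =>
            simp only [pvStepA, pvStepB, h1, h2, pvEnc, if_pos, if_neg, Bool.not_eq_true]
            by_cases hl : PySem.Str.strip raw = ""
            · have := ih (items ++ [("Conclusion", "")]) P c false true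
                (by rw [pvPrems_append]; simp [hP]) (by rw [pvConcl_append]; simp [hc])
              simpa [pvEnc, hl] using this
            · have := ih (items ++ [("Conclusion", PySem.Str.strip raw)]) P (PySem.Str.strip raw) false true
                (by rw [pvPrems_append]; simp [hP]) (by rw [pvConcl_append]; simp [hl])
              simpa [pvEnc, hl] using this
          | false =>
            simp only [pvStepA, pvStepB, h1, h2, pvEnc, if_neg, Bool.not_eq_true]
            exact ih items P c false false hP hc

-- ===== VERDICT (by name: the statement is the Claim_ definition above) =====
theorem extract_logic_statements_spec : Claim_equal_extract_logic_statements := by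
  intro text _
  unfold Spec_extract_logic_statements extract_logic_statements extract_logic_statements_alt
  have h := pvFold_rel ((PySem.Str.split? text "\n").getD []) [] [] "" false false
    (by simp [pvPrems]) (by simp [pvConcl])
  simp only [pvEnc, if_false, Bool.false_eq_true] at h
  exact Prod.ext h.1 h.2
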